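-- pv_equiv track=rewrite | github.com/potato-vita/ClawShield | app/analyzer/risk_analyzer.py | _max_risk
-- ===== SOURCE A (Python) =====
-- def _max_risk(levels: list[str]) -> str | None:
--     if not levels:
--         return None
--
--     rank = {
--         "low": 1,
--         "medium": 2,
--         "high": 3,
--         "critical": 4,
--         "severe": 4,
--     }
--     winner = "low"
--     winner_rank = 0
--     for level in levels:
--         normalized = (level or "low").lower()
--         current_rank = rank.get(normalized, 0)
--         if current_rank > winner_rank:
--             winner = normalized
--             winner_rank = current_rank
--     return winner if winner_rank > 0 else None
-- ===== SOURCE B (Python) =====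
-- def _max_risk(levels: list[str]) -> str | None:
--     rank = {
--         "low": 1,
--         "medium": 2,
--         "high": 3,
--         "critical": 4,
--         "severe": 4,
--     }
--     normalized = [(level or "low").lower() for level in levels]
--     best = max((rank.get(n, 0) for n in normalized), default=0)
--     if best == 0:
--         return None
--     return next(n for n in normalized if rank.get(n, 0) == best)
-- ===== Notes on version B (the rewrite author's own statement) =====
-- stated objective: alternative
-- what changed: Replaces the single running-winner loop by a two-pass scheme: normalize all levels once, take the maximum rank over the normalized list, then return the first normalized level achieving that maximum (None when the maximum is 0, which also covers the empty list).
import Mathlib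
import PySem

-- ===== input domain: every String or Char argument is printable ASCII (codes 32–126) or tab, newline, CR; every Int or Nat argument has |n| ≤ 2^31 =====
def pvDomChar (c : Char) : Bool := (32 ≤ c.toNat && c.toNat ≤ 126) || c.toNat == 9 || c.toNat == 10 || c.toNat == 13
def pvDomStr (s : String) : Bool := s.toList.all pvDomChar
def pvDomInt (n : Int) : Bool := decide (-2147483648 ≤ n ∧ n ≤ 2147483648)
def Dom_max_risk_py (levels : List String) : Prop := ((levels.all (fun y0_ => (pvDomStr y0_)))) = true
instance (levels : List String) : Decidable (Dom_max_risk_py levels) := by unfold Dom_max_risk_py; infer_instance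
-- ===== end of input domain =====

-- B replaces A's running-winner loop by normalize-once, take the max rank, then return the
-- first normalized level reaching it (alternative decomposition, same cost).


-- the literal rank dict both Pythons write, and rank.get(n, 0)
def pvRankDict : PySem.Dict String Int :=
  PySem.Dict.mk [("low", 1), ("medium", 2), ("high", 3), ("critical", 4), ("severe", 4)]
def pvRank (n : String) : Int := PySem.Dict.getD pvRankDict n 0
-- (level or "low").lower()
def pvNorm (level : String) : String := PySem.Str.lower (if level = "" then "low" else level)

-- ===== PORT A =====
def max_risk_py (levels : List String) : Option String :=
  if levels = [] then none
  else
    let p : String × Int := levels.foldl (fun st level =>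
      let normalized := pvNorm level
      let current_rank := pvRank normalized
      if st.2 < current_rank then (normalized, current_rank) else st) ("low", 0)
    if 0 < p.2 then some p.1 else none

-- ===== PORT B =====
-- Python's next(...) over the generator is the first match; it cannot be exhausted in the
-- branch best ≠ 0, so List.find? (always some there) is an exact port.
def max_risk_py_alt (levels : List String) : Option String :=
  let normalized := levels.map pvNorm
  let best := (PySem.List.max? (normalized.map pvRank) (fun x => x)).getD 0
  if best = 0 then none
  else normalized.find? (fun n => pvRank n == best)

-- ===== PRECONDITION & SPEC =====
def Spec_max_risk_py (levels : List String) (out : Option String) : Prop := out = max_risk_py_alt levels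
instance (levels : List String) (out : Option String) : Decidable (Spec_max_risk_py levels out) := by unfold Spec_max_risk_py; infer_instance

-- ===== CLAIM (what is proved, stated in full; the proofs are below) =====
def Claim_equal_max_risk_py : Prop := ∀ (levels : List String), Dom_max_risk_py levels → Spec_max_risk_py levels (max_risk_py levels)

-- ===== LEMMAS AND PROOFS =====

-- running max of the ranks, started at wr
def pvBest (ns : List String) (wr : Int) : Int := ns.foldl (fun a n => max a (pvRank n)) wr

theorem le_pvBest (ns : List String) (wr : Int) : wr ≤ pvBest ns wr := by
  induction ns generalizing wr with
  | nil => exact le_refl _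
  | cons n t ih =>
    have := ih (max wr (pvRank n))
    simp only [pvBest, List.foldl_cons] at *
    exact le_trans (le_max_left _ _) this

theorem rank_le_pvBest (ns : List String) (wr : Int) (n : String) (hn : n ∈ ns) :
    pvRank n ≤ pvBest ns wr := by
  induction ns generalizing wr with
  | nil => cases hn
  | cons m t ih =>
    rcases List.mem_cons.mp hn with h | h
    · subst h
      exact le_trans (le_max_right wr (pvRank n)) (le_pvBest t _)
    · exact ih _ h

theorem pvBest_attained (ns : List String) (wr : Int) :
    pvBest ns wr = wr ∨ ∃ m ∈ ns, pvRank m = pvBest ns wr := by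
  induction ns generalizing wr with
  | nil => left; rfl
  | cons n t ih =>
    have hcons : pvBest (n :: t) wr = pvBest t (max wr (pvRank n)) := rfl
    rcases ih (max wr (pvRank n)) with h | ⟨m, hm, he⟩
    · by_cases hc : wr < pvRank n
      · right
        exact ⟨n, List.mem_cons_self, by rw [hcons, h]; omega⟩
      · left
        rw [hcons, h]
        omega
    · right
      exact ⟨m, List.mem_cons_of_mem _ hm, by rw [hcons]; exact he⟩

theorem find?_congr_mem {α : Type} (p q : α → Bool) (xs : List α)
    (h : ∀ x ∈ xs, p x = q x) : xs.find? p = xs.find? q := by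
  induction xs with
  | nil => rfl
  | cons x t ih =>
    simp only [List.find?]
    rw [h x (List.mem_cons_self), ih (fun y hy => h y (List.mem_cons_of_mem _ hy))]

-- A's fold characterised: the winner is the first element whose rank equals the running max
-- and strictly exceeds the initial threshold wr.
theorem foldA_eq (ns : List String) (w : String) (wr : Int) :
    ns.foldl (fun st n => if st.2 < pvRank n then (n, pvRank n) else st) (w, wr) =
      match ns.find? (fun n => decide (wr < pvRank n) && decide (pvBest ns wr ≤ pvRank n)) with
      | some n => (n, pvRank n)
      | none => (w, wr) := by
  induction ns generalizing w wr with
  | nil => rfl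
  | cons n t ih =>
    simp only [List.foldl_cons, List.find?]
    by_cases h : wr < pvRank n
    · by_cases hb : pvBest (n :: t) wr ≤ pvRank n
      · -- n itself is the winner: everything later is ≤ pvRank n, so no later update
        simp only [h, hb, decide_true, Bool.and_self, if_true]
        have hstop : ∀ m ∈ t, ¬ (pvRank n < pvRank m) := by
          intro m hm hlt
          have : pvRank m ≤ pvBest (n :: t) wr :=
            rank_le_pvBest _ _ _ (List.mem_cons_of_mem _ hm)
          omega
        rw [ih n (pvRank n)]
        have hnone : t.find? (fun m => decide (pvRank n < pvRank m) && decide (pvBest t (pvRank n) ≤ pvRank m)) = none := by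
          rw [List.find?_eq_none]
          intro m hm
          simp only [Bool.and_eq_true, decide_eq_true_eq, not_and]
          intro hlt
          exact absurd hlt (hstop m hm)
        rw [hnone]
      · -- a strictly larger element comes later; predicates agree on t
        simp only [hb, decide_false, Bool.and_false, if_pos h]
        rw [ih n (pvRank n)]
        have hbests : pvBest (n :: t) wr = pvBest t (pvRank n) := by
          simp only [pvBest, List.foldl_cons]
          congr 1
          omega
        have hcong : ∀ m ∈ t,
            (decide (pvRank n < pvRank m) && decide (pvBest t (pvRank n) ≤ pvRank m)) =
            (decide (wr < pvRank m) && decide (pvBest (n :: t) wr ≤ pvRank m)) := by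
          intro m hm
          rw [hbests]
          by_cases hle : pvBest t (pvRank n) ≤ pvRank m
          · have hn_lt : pvRank n < pvBest t (pvRank n) := by
              rw [← hbests]; omega
            have h1 : pvRank n < pvRank m := by omega
            have h2 : wr < pvRank m := by omega
            simp [hle, h1, h2]
          · simp [hle]
        rw [find?_congr_mem _ _ _ hcong]
        have hex : ∃ m ∈ t, pvRank m = pvBest (n :: t) wr := by
          rcases pvBest_attained t (pvRank n) with hh | ⟨m, hm, he⟩
          · rw [hbests] at hb; omega
          · exact ⟨m, hm, by rw [hbests]; exact he⟩
        rcases hex with ⟨m, hm, he⟩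
        cases hf : t.find? (fun m => decide (wr < pvRank m) && decide (pvBest (n :: t) wr ≤ pvRank m)) with
        | none =>
          exfalso
          have hnm := List.find?_eq_none.mp hf m hm
          have h1 : wr < pvRank m := by omega
          have h2 : pvBest (n :: t) wr ≤ pvRank m := by omega
          simp [h1, h2] at hnm
        | some m' => rfl
    · -- n does not beat wr: state unchanged, running max unchanged
      have hband : (decide (wr < pvRank n) && decide (pvBest (n :: t) wr ≤ pvRank n)) = false := by
        simp [h]
      simp only [hband, if_neg h]
      rw [ih w wr]
      have hbests : pvBest (n :: t) wr = pvBest t wr := by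
        simp only [pvBest, List.foldl_cons]
        congr 1
        omega
      have hcong : ∀ m ∈ t,
          (decide (wr < pvRank m) && decide (pvBest t wr ≤ pvRank m)) =
          (decide (wr < pvRank m) && decide (pvBest (n :: t) wr ≤ pvRank m)) := by
        intro m hm; rw [hbests]
      rw [find?_congr_mem _ _ _ hcong]

theorem pvRank_nonneg (n : String) : 0 ≤ pvRank n := by
  simp only [pvRank, pvRankDict, PySem.Dict.getD, PySem.Dict.get?_mk_cons]
  repeat' split
  all_goals simp [PySem.Dict.get?]

-- B's max(…, default=0) equals the running max started at 0 (ranks are never negative)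
theorem maxD_eq_pvBest (ns : List String) :
    (PySem.List.max? (ns.map pvRank) (fun x => x)).getD 0 = pvBest ns 0 := by
  cases ns with
  | nil => rfl
  | cons n t =>
    simp only [List.map_cons, PySem.List.max?_id_cons, Option.getD_some]
    have : ∀ (init : Int), 0 ≤ init →
        (t.map pvRank).foldl max init = pvBest t init := by
      intro init _
      induction t generalizing init with
      | nil => rfl
      | cons m s ih =>
        simp only [List.map_cons, List.foldl_cons, pvBest] at *
        exact ih (max init (pvRank m)) (le_trans (by assumption) (le_max_left _ _))
    have h0 : pvBest t (pvRank n) = pvBest t (max 0 (pvRank n)) := by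
      have := pvRank_nonneg n
      congr 1
      omega
    rw [this (pvRank n) (pvRank_nonneg n), h0]
    rfl

theorem foldA_map (ls : List String) (st : String × Int) :
    ls.foldl (fun st level =>
      let normalized := pvNorm level
      let current_rank := pvRank normalized
      if st.2 < current_rank then (normalized, current_rank) else st) st =
    (ls.map pvNorm).foldl (fun st n => if st.2 < pvRank n then (n, pvRank n) else st) st := by
  rw [List.foldl_map]

-- ===== VERDICT (by name: the statement is the Claim_ definition above) =====
theorem max_risk_py_spec : Claim_equal_max_risk_py := by
  intro levels _
  show max_risk_py levels = max_risk_py_alt levels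
  cases levels with
  | nil => rfl
  | cons l ls =>
    have h1 : max_risk_py (l :: ls) =
        (if 0 < (((l :: ls).map pvNorm).foldl
            (fun st n => if st.2 < pvRank n then (n, pvRank n) else st) ("low", 0)).2
         then some (((l :: ls).map pvNorm).foldl
            (fun st n => if st.2 < pvRank n then (n, pvRank n) else st) ("low", 0)).1
         else none) := by
      simp only [max_risk_py, if_neg (List.cons_ne_nil l ls), foldA_map]
    have h2 : max_risk_py_alt (l :: ls) =
        (if pvBest ((l :: ls).map pvNorm) 0 = 0 then none
         else ((l :: ls).map pvNorm).find? (fun n => pvRank n == pvBest ((l :: ls).map pvNorm) 0)) := by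
      simp only [max_risk_py_alt, maxD_eq_pvBest]
    rw [h1, h2, foldA_eq]
    set ns : List String := (l :: ls).map pvNorm with hns
    by_cases hz : pvBest ns 0 = 0
    · -- no element has positive rank: both sides none
      have hnone : ns.find? (fun n => decide ((0 : Int) < pvRank n) && decide (pvBest ns 0 ≤ pvRank n)) = none := by
        rw [List.find?_eq_none]
        intro n hn
        have := rank_le_pvBest ns 0 n hn
        simp only [Bool.and_eq_true, decide_eq_true_eq, not_and]
        intro h1
        omega
      rw [hnone]
      simp [hz]
    · have hpos : 0 < pvBest ns 0 := by
        have := le_pvBest ns 0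
        omega
      have hcong : ∀ n ∈ ns,
          (decide ((0 : Int) < pvRank n) && decide (pvBest ns 0 ≤ pvRank n)) =
          (pvRank n == pvBest ns 0) := by
        intro n hn
        have hub := rank_le_pvBest ns 0 n hn
        by_cases he : pvRank n = pvBest ns 0
        · simp [he, hpos]
        · have hlt : ¬ (pvBest ns 0 ≤ pvRank n) := by omega
          simp [hlt, he]
      rw [find?_congr_mem _ _ _ hcong, if_neg hz]
      cases hf : ns.find? (fun n => pvRank n == pvBest ns 0) with
      | none => rfl
      | some n =>
        have heq : pvRank n = pvBest ns 0 := by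
          simpa using List.find?_some hf
        simp [heq, hpos]
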